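-- pv_equiv track=rewrite | github.com/RefaatElabd-dev/Cryptography | StreamCipher/StreamCipher.py | transmit2
-- ===== SOURCE A (Python) =====
-- def transmit2(cipher):
--     b=[]
--     for i in range(len(cipher)):
--         c = cipher[i]
--         if i == 3:
--             c = cipher[i] ^ 2**5
--         b.append(c)
--     return b
-- ===== SOURCE B (Python) =====
-- def transmit2(cipher):
--     if len(cipher) <= 3:
--         return cipher[:]
--     return cipher[:3] + [cipher[3] ^ 2**5] + cipher[4:]
-- ===== Notes on version B (the rewrite author's own statement) =====
-- stated objective: simpler
-- what changed: Replaces A's per-index loop-and-append with slice assembly: the output is the concatenation of the prefix before index 3, the one toggled element, and the suffix after it (or a plain slice copy for short lists), with no loop at all.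
import Mathlib
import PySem

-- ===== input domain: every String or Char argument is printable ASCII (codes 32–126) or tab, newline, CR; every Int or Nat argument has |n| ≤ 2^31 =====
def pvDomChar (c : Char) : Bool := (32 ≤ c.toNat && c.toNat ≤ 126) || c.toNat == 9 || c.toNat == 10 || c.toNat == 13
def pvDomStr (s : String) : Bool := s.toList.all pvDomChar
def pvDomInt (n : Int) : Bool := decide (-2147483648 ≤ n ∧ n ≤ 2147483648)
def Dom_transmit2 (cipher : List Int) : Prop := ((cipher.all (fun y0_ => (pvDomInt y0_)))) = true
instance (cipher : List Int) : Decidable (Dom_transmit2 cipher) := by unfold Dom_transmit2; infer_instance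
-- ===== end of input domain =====

-- B assembles the output from slices (prefix + toggled element + suffix) instead of A's index loop with append.
-- ===== PORT A =====
def transmit2 (cipher : List Int) : List Int :=
  (PySem.List.pyRange 0 cipher.length 1).foldl
    (fun b i =>
      let c := PySem.List.pyGetD cipher i 0
      let c := if i == 3 then PySem.Int.bxor (PySem.List.pyGetD cipher i 0) (2^5) else c
      b ++ [c]) []

-- ===== PORT B =====
def transmit2_alt (cipher : List Int) : List Int :=
  if cipher.length ≤ 3 then PySem.List.slice cipher none none
  else PySem.List.slice cipher none (some 3)
       ++ [PySem.Int.bxor (PySem.List.pyGetD cipher 3 0) (2^5)]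
       ++ PySem.List.slice cipher (some 4) none

-- ===== PRECONDITION & SPEC =====
def Spec_transmit2 (cipher : List Int) (out : List Int) : Prop := out = transmit2_alt cipher
instance (cipher : List Int) (out : List Int) : Decidable (Spec_transmit2 cipher out) := by unfold Spec_transmit2; infer_instance

-- ===== CLAIM (what is proved, stated in full; the proofs are below) =====
def Claim_equal_transmit2 : Prop := ∀ (cipher : List Int), Dom_transmit2 cipher → Spec_transmit2 cipher (transmit2 cipher)

-- ===== LEMMAS AND PROOFS =====
theorem transmit2_eq_map (cipher : List Int) :
    transmit2 cipher = (List.range cipher.length).map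
      (fun (k : Nat) => if k = 3 then PySem.Int.bxor (PySem.List.pyGetD cipher (k : Int) 0) 32
                else PySem.List.pyGetD cipher (k : Int) 0) := by
  unfold transmit2
  rw [PySem.List.pyRange_one]
  rw [List.foldl_map, PySem.List.foldl_append_singleton_eq_map]
  simp only [List.nil_append, Int.sub_zero, Int.toNat_natCast, zero_add]
  apply List.map_congr_left
  intro k hk
  by_cases h : k = 3
  · simp [h]
  · simp [h]; intro hc; omega

-- ===== VERDICT (by name: the statement is the Claim_ definition above) =====
theorem transmit2_spec : Claim_equal_transmit2 := by
  intro cipher _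
  unfold Spec_transmit2 transmit2_alt
  rw [transmit2_eq_map]
  by_cases h : cipher.length ≤ 3
  · rw [if_pos h, PySem.List.slice_none_none]
    apply List.ext_getElem
    · simp
    · intro k hk1 hk2
      simp only [List.getElem_map, List.getElem_range]
      have hk : k ≠ 3 := by simp at hk1; omega
      rw [PySem.List.pyGetD_natCast]
      simp [hk, List.getD, List.getElem?_eq_getElem hk2]
  · rw [if_neg h]
    have h4 : (4 : Int) = ((4 : Nat) : Int) := by norm_num
    have h3 : (3 : Int) = ((3 : Nat) : Int) := by norm_num
    rw [h4, h3, PySem.List.slice_from_natCast, PySem.List.slice_to_natCast]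
    apply List.ext_getElem
    · simp; omega
    · intro k hk1 hk2
      simp only [List.getElem_map, List.getElem_range]
      rw [PySem.List.pyGetD_natCast]
      have hb : k < cipher.length := by simpa using hk1
      have hgd : cipher.getD k 0 = cipher[k] := by
        simp [List.getD, List.getElem?_eq_getElem hb]
      have hgd3 : PySem.List.pyGetD cipher ((3:Nat):Int) 0 = cipher[3]'(by omega) := by
        rw [PySem.List.pyGetD_natCast]
        simp [List.getD, List.getElem?_eq_getElem (show 3 < cipher.length by omega)]
      have hmin : min 3 cipher.length = 3 := by omega
      simp only [List.getElem_append, List.length_append, List.length_take,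
        List.length_cons, List.length_nil, List.getElem_take, List.getElem_drop, hgd, hgd3, hmin]
      split_ifs <;> first | rfl | omega | (subst_vars; rfl) | (apply getElem_congr_idx; omega)
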